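-- pv_equiv track=rewrite | github.com/woosang0430/Programmers | beakjoon/class2/숨바꼭질.py | solution
-- ===== SOURCE A (Python) =====
-- from collections import deque
-- from collections import deque
--
-- def solution(n, k):
--     if n == k:
--         return 0
--
--     dq = deque([(n, 0)])
--     visited = set()
--     while dq:
--         x, cnt = dq.popleft()
--         if x == k:
--             return cnt
--         elif x not in range(k) or x in visited:
--             continue
--         cnt += 1
--         dq.extend([(x+1, cnt), (x-1, cnt), (x*2, cnt)])
--         visited.add(x)
-- ===== SOURCE B (Python) =====
-- def climb(n, k, t):
--     # fewest moves from n to t when every stepping stone must lie in [0, k)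
--     if t <= n:
--         return n - t
--     if t % 2 == 0:
--         # walk straight up, or reach t//2 and double
--         return min(t - n, 1 + climb(n, k, t // 2))
--     # odd t: enter from t-1, or (when t+1 is a legal stepping stone) from t+1;
--     # for t == 1 (then n == 0) the detour through 2 can never win.
--     best = 1 + climb(n, k, t - 1)
--     if t + 1 < k and t >= 3:
--         best = min(best, 1 + min(t + 1 - n, 1 + climb(n, k, (t + 1) // 2)))
--     return best
--
-- def solution(n, k):
--     if n == k:
--         return 0
--     if not (0 <= n < k):
--         return None
--     return climb(n, k, k)
-- ===== Notes on version B (the rewrite author's own statement) =====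
-- stated objective: faster
-- what changed: Replaced the forward (node,count) deque BFS over [0,k) by a backwards divide-and-conquer recursion on the target: climb(n,k,t) returns min moves to t in closed form for t<=n, combines 'walk up' (t-n) with halving (climb on t//2) for even t, and for odd t takes the better of entering from t-1 or from the legal even overshoot t+1 — no queue, no visited set, no per-node exploration.
import Mathlib
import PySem

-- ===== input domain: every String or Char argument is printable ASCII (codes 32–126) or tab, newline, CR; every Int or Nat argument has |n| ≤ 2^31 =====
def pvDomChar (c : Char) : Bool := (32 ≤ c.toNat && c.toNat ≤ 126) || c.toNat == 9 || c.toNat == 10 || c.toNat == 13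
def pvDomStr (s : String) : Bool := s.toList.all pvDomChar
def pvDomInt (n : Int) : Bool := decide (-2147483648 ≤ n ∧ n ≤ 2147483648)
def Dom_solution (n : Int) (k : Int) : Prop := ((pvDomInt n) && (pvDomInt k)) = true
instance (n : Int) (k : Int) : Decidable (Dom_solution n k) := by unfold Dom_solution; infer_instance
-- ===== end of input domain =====

-- B replaces A's forward (node, count) deque BFS by a backwards recursion on the target
-- (objective: faster).  Both ports represent the Python `visited` set as a Finset Int (exact:
-- only membership and insertion are used); the count of visited nodes inside [0, k) bounds A's loop.

-- number of visited nodes that lie in range(k); used only as the termination measure of A's loop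
def pvCard (k : Int) (vis : Finset Int) : Nat :=
  (vis.filter (fun x => 0 ≤ x ∧ x < k)).card

theorem pvCard_le (k : Int) (vis : Finset Int) : pvCard k vis ≤ k.toNat := by
  classical
  have hsub : vis.filter (fun x => 0 ≤ x ∧ x < k) ⊆ Finset.Ico 0 k := by
    intro x hx
    simp only [Finset.mem_filter] at hx
    simp [Finset.mem_Ico, hx.2.1, hx.2.2]
  have := Finset.card_le_card hsub
  simpa [pvCard, Int.card_Ico] using this

theorem pvCard_insert (k x : Int) (vis : Finset Int) (h0 : 0 ≤ x) (h1 : x < k)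
    (hx : x ∉ vis) : pvCard k (insert x vis) = pvCard k vis + 1 := by
  classical
  unfold pvCard
  rw [Finset.filter_insert, if_pos ⟨h0, h1⟩, Finset.card_insert_of_notMem]
  simp [Finset.mem_filter, hx]

-- ===== PORT A =====
-- literal port of A's while loop over the deque of (node, count) pairs
def loopA (k : Int) (dq : List (Int × Int)) (vis : Finset Int) : Option Int :=
  match dq with
  | [] => none
  | (x, cnt) :: rest =>
    if x = k then some cnt
    else if ¬(0 ≤ x ∧ x < k) ∨ x ∈ vis then loopA k rest vis
    else loopA k (rest ++ [(x + 1, cnt + 1), (x - 1, cnt + 1), (x * 2, cnt + 1)]) (insert x vis)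
termination_by 3 * (k.toNat + 1 - pvCard k vis) + dq.length
decreasing_by
  · simp only [List.length_cons]
    omega
  · rename_i h
    push Not at h
    have hins := pvCard_insert k x vis h.1.1 h.1.2 h.2
    have hle := pvCard_le k vis
    simp only [List.length_append, List.length_cons, List.length_nil]
    omega

def solution (n : Int) (k : Int) : Option Int :=
  if n = k then some 0 else loopA k [(n, 0)] ∅

-- ===== PORT B =====
-- literal port of Source B's `climb`; `fuel` only makes the recursion total in Lean (Python's
-- recursion terminates on every call `solution` makes, and `solution_alt` supplies enough fuel)
def climb (n k : Int) (fuel : Nat) (t : Int) : Int :=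
  match fuel with
  | 0 => 0
  | fuel + 1 =>
    if t ≤ n then n - t
    else if PySem.Int.mod t 2 = 0 then
      min (t - n) (1 + climb n k fuel (PySem.Int.floordiv t 2))
    else
      let best := 1 + climb n k fuel (t - 1)
      if t + 1 < k ∧ 3 ≤ t then
        min best (1 + min (t + 1 - n) (1 + climb n k fuel (PySem.Int.floordiv (t + 1) 2)))
      else best

def solution_alt (n : Int) (k : Int) : Option Int :=
  if n = k then some 0
  else if ¬(0 ≤ n ∧ n < k) then none
  else some (climb n k (k.toNat + 1) k)

-- ===== PRECONDITION & SPEC =====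
def Spec_solution (n : Int) (k : Int) (out : Option Int) : Prop := out = solution_alt n k
instance (n : Int) (k : Int) (out : Option Int) : Decidable (Spec_solution n k out) := by unfold Spec_solution; infer_instance

-- ===== CLAIM (what is proved, stated in full; the proofs are below) =====
def Claim_equal_solution : Prop := ∀ (n : Int) (k : Int), Dom_solution n k → Spec_solution n k (solution n k)

-- ===== LEMMAS AND PROOFS =====

-- ---- the abstract graph: one step from x (a legal stepping stone) reaches x+1, x-1, 2x ----
def nbrs (x : Int) : List Int := [x + 1, x - 1, x * 2]

def Reach (n k : Int) : Nat → Int → Prop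
  | 0, t => t = n
  | d + 1, t => Reach n k d t ∨ ∃ x, Reach n k d x ∧ 0 ≤ x ∧ x < k ∧ t ∈ nbrs x

-- least number of moves from n to t (0 if unreachable; all uses carry a reachability proof)
noncomputable def pvDist (n k t : Int) : Nat := sInf {d | Reach n k d t}

theorem reach_succ (n k : Int) (d : Nat) (t : Int) (h : Reach n k d t) :
    Reach n k (d + 1) t := Or.inl h

theorem reach_mono (n k : Int) (d d' : Nat) (hdd : d ≤ d') (t : Int)
    (h : Reach n k d t) : Reach n k d' t := by
  induction d' with
  | zero =>
    have hd : d = 0 := by omega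
    subst hd; exact h
  | succ m ih =>
    by_cases hd : d = m + 1
    · subst hd; exact h
    · exact Or.inl (ih (by omega))

-- walking up: n, n+1, …, n+j (stepping stones below k)
theorem reach_walk_up (n k : Int) (hn : 0 ≤ n) (j : Nat) (hj : n + j ≤ k) :
    Reach n k j (n + j) := by
  induction j with
  | zero => simp [Reach]
  | succ m ih =>
    have hm : n + (m : Int) ≤ k := by push_cast at hj; omega
    refine Or.inr ⟨n + m, ih hm, by omega, by push_cast at hj; omega, ?_⟩
    simp only [nbrs, List.mem_cons]
    left; push_cast; ring

-- walking down: n, n-1, …, t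
theorem reach_walk_down (n k t : Int) (hn : n < k) (h0 : 0 ≤ t) (ht : t ≤ n) :
    Reach n k (n - t).toNat t := by
  have key : ∀ j : Nat, (j : Int) ≤ n - t → Reach n k j (n - j) := by
    intro j
    induction j with
    | zero => intro _; simp [Reach]
    | succ m ih =>
      intro hm
      have hmle : (m : Int) ≤ n - t := by push_cast at hm; omega
      refine Or.inr ⟨n - m, ih hmle, by push_cast at hm; omega, by omega, ?_⟩
      simp only [nbrs, List.mem_cons]
      right; left; push_cast; ring
  have := key (n - t).toNat (by omega)
  have he : n - ((n - t).toNat : Int) = t := by omega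
  rwa [he] at this

-- each move lowers the position by at most 1
theorem reach_lower (n k : Int) (d : Nat) (t : Int) (h : Reach n k d t) :
    n - d ≤ t := by
  induction d generalizing t with
  | zero => simp [Reach] at h; omega
  | succ m ih =>
    rcases h with h | ⟨x, hx, hx0, _, hnb⟩
    · have := ih t h; push_cast; omega
    · have := ih x hx
      simp [nbrs] at hnb
      push_cast
      rcases hnb with h1 | h1 | h1 <;> omega

theorem reach_exists (n k t : Int) (hn : 0 ≤ n) (hk : n < k) (h0 : 0 ≤ t)
    (ht : t ≤ k) : ∃ d, Reach n k d t := by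
  rcases le_or_gt t n with hle | hlt
  · exact ⟨(n - t).toNat, reach_walk_down n k t hk h0 hle⟩
  · refine ⟨(t - n).toNat, ?_⟩
    have := reach_walk_up n k hn (t - n).toNat (by omega)
    have he : n + ((t - n).toNat : Int) = t := by omega
    rwa [he] at this

-- ---- pvDist facts ----
theorem pvDist_le (n k t : Int) (d : Nat) (h : Reach n k d t) : pvDist n k t ≤ d :=
  Nat.sInf_le h

theorem pvDist_reach (n k t : Int) (h : ∃ d, Reach n k d t) :
    Reach n k (pvDist n k t) t := Nat.sInf_mem h

-- an edge gives the triangle inequality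
theorem pvDist_step (n k x t : Int) (hx : ∃ d, Reach n k d x) (h0 : 0 ≤ x)
    (h1 : x < k) (hnb : t ∈ nbrs x) : pvDist n k t ≤ pvDist n k x + 1 := by
  have hr := pvDist_reach n k x hx
  exact pvDist_le n k t _ (Or.inr ⟨x, hr, h0, h1, hnb⟩)

-- a positive distance decomposes along a last edge
theorem pvDist_decompose (n k t : Int) (m : Nat) (hm : pvDist n k t = m + 1) :
    ∃ x, 0 ≤ x ∧ x < k ∧ t ∈ nbrs x ∧ (∃ d, Reach n k d x) ∧ pvDist n k x ≤ m := by
  have hne : {d | Reach n k d t}.Nonempty := by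
    by_contra hcon
    have : {d | Reach n k d t} = ∅ := Set.not_nonempty_iff_eq_empty.mp hcon
    rw [pvDist, this] at hm
    simp at hm
  have hr : Reach n k (m + 1) t := by
    have := Nat.sInf_mem hne
    rwa [show sInf {d | Reach n k d t} = m + 1 from hm] at this
  rcases hr with h | ⟨x, hx, h0, h1, hnb⟩
  · exfalso
    have := pvDist_le n k t m h
    omega
  · exact ⟨x, h0, h1, hnb, ⟨m, hx⟩, pvDist_le n k x m hx⟩

-- C1: for 0 ≤ t ≤ n the distance is exactly n - t
theorem dist_below (n k t : Int) (hk : n < k) (h0 : 0 ≤ t) (ht : t ≤ n) :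
    pvDist n k t = (n - t).toNat := by
  have hle := pvDist_le n k t _ (reach_walk_down n k t hk h0 ht)
  have hge := reach_lower n k (pvDist n k t) t
    (pvDist_reach n k t ⟨_, reach_walk_down n k t hk h0 ht⟩)
  omega

-- C2 easy direction pieces
theorem dist_le_walk (n k t : Int) (hn : 0 ≤ n) (hlt : n ≤ t) (ht : t ≤ k) :
    pvDist n k t ≤ (t - n).toNat := by
  have := reach_walk_up n k hn (t - n).toNat (by omega)
  have he : n + ((t - n).toNat : Int) = t := by omega
  rw [he] at this
  exact pvDist_le n k t _ this

theorem pvDist_eq_zero (n k t : Int) (h : ∃ d, Reach n k d t)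
    (h0 : pvDist n k t = 0) : t = n := by
  have := pvDist_reach n k t h
  rw [h0] at this
  exact this

theorem pvDist_pos (n k t : Int) (hn : 0 ≤ n) (hk : n < k) (h0 : 0 ≤ t) (ht : t ≤ k)
    (hne : t ≠ n) : 1 ≤ pvDist n k t := by
  rcases Nat.eq_zero_or_pos (pvDist n k t) with h | h
  · exact absurd (pvDist_eq_zero n k t (reach_exists n k t hn hk h0 ht) h) hne
  · exact h

-- C2: characterization at an even target n < t ≤ k (induction on a bound for the distance)
theorem dist_even_aux (n k : Int) (hn : 0 ≤ n) (hk : n < k) :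
    ∀ m : Nat, ∀ t : Int, n < t → t ≤ k → t % 2 = 0 → pvDist n k t ≤ m →
      pvDist n k t = min (t - n).toNat (1 + pvDist n k (t / 2)) := by
  intro m
  induction m with
  | zero =>
    intro t hlt ht _ hm
    exact absurd (pvDist_pos n k t hn hk (by omega) ht (by omega)) (by omega)
  | succ m ih =>
    intro t hlt ht heven hm
    have ht2 : (2 : Int) ≤ t := by omega
    have hrhalf : ∃ d, Reach n k d (t / 2) :=
      reach_exists n k (t / 2) hn hk (by omega) (by omega)
    have le1 : pvDist n k t ≤ (t - n).toNat := dist_le_walk n k t hn (by omega) ht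
    have le2 : pvDist n k t ≤ 1 + pvDist n k (t / 2) := by
      have := pvDist_step n k (t / 2) t hrhalf (by omega) (by omega)
        (by simp only [nbrs, List.mem_cons]; omega)
      omega
    have hpos : 1 ≤ pvDist n k t := pvDist_pos n k t hn hk (by omega) ht (by omega)
    obtain ⟨m1, hm1⟩ : ∃ m1, pvDist n k t = m1 + 1 := ⟨pvDist n k t - 1, by omega⟩
    obtain ⟨z, hz0, hz1, hznb, hzr, hzle⟩ := pvDist_decompose n k t m1 hm1
    simp only [nbrs, List.mem_cons, List.not_mem_nil, or_false] at hznb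
    have hge : min (t - n).toNat (1 + pvDist n k (t / 2)) ≤ pvDist n k t := by
      rcases hznb with hcase | hcase | hcase
      · -- last move was +1 from z = t - 1
        have hz : z = t - 1 := by omega
        subst hz
        by_cases hsmall : t - 1 ≤ n
        · omega
        · have hp1 : 1 ≤ pvDist n k (t - 1) :=
            pvDist_pos n k (t - 1) hn hk (by omega) (by omega) (by omega)
          obtain ⟨m2, hm2⟩ : ∃ m2, pvDist n k (t - 1) = m2 + 1 :=
            ⟨pvDist n k (t - 1) - 1, by omega⟩
          obtain ⟨q, hq0, hq1, hqnb, hqr, hqle⟩ := pvDist_decompose n k (t - 1) m2 hm2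
          simp only [nbrs, List.mem_cons, List.not_mem_nil, or_false] at hqnb
          rcases hqnb with hc2 | hc2 | hc2
          · -- q = t - 2
            have hq : q = t - 2 := by omega
            subst hq
            by_cases hsmall2 : t - 2 ≤ n
            · omega
            · have hih := ih (t - 2) (by omega) (by omega) (by omega) (by omega)
              have hd2 : (t - 2) / 2 = t / 2 - 1 := by omega
              rw [hd2] at hih
              have hstep : pvDist n k (t / 2) ≤ pvDist n k (t / 2 - 1) + 1 :=
                pvDist_step n k (t / 2 - 1) (t / 2)
                  (reach_exists n k (t / 2 - 1) hn hk (by omega) (by omega))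
                  (by omega) (by omega) (by simp only [nbrs, List.mem_cons]; omega)
              omega
          · -- q = t would make the path longer than itself
            have hq : q = t := by omega
            subst hq
            omega
          · -- t - 1 odd can not be a doubling
            omega
      · -- last move was -1 from z = t + 1 (so t + 1 < k)
        have hz : z = t + 1 := by omega
        subst hz
        have hp1 : 1 ≤ pvDist n k (t + 1) :=
          pvDist_pos n k (t + 1) hn hk (by omega) (by omega) (by omega)
        obtain ⟨m2, hm2⟩ : ∃ m2, pvDist n k (t + 1) = m2 + 1 :=
          ⟨pvDist n k (t + 1) - 1, by omega⟩
        obtain ⟨q, hq0, hq1, hqnb, hqr, hqle⟩ := pvDist_decompose n k (t + 1) m2 hm2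
        simp only [nbrs, List.mem_cons, List.not_mem_nil, or_false] at hqnb
        rcases hqnb with hc2 | hc2 | hc2
        · -- q = t would make the path longer than itself
          have hq : q = t := by omega
          subst hq
          omega
        · -- q = t + 2
          have hq : q = t + 2 := by omega
          subst hq
          have hih := ih (t + 2) (by omega) (by omega) (by omega) (by omega)
          have hd2 : (t + 2) / 2 = t / 2 + 1 := by omega
          rw [hd2] at hih
          have hstep : pvDist n k (t / 2) ≤ pvDist n k (t / 2 + 1) + 1 :=
            pvDist_step n k (t / 2 + 1) (t / 2)
              (reach_exists n k (t / 2 + 1) hn hk (by omega) (by omega))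
              (by omega) (by omega) (by simp only [nbrs, List.mem_cons]; omega)
          omega
        · -- t + 1 odd can not be a doubling
          omega
      · -- last move was a doubling from z = t / 2
        have hz : z = t / 2 := by omega
        subst hz
        omega
    omega

theorem dist_even (n k t : Int) (hn : 0 ≤ n) (hk : n < k) (hlt : n < t) (ht : t ≤ k)
    (heven : t % 2 = 0) :
    pvDist n k t = min (t - n).toNat (1 + pvDist n k (t / 2)) :=
  dist_even_aux n k hn hk (pvDist n k t) t hlt ht heven le_rfl

-- C3: characterization at an odd target n < t ≤ k
theorem dist_odd (n k t : Int) (hn : 0 ≤ n) (hk : n < k) (hlt : n < t) (ht : t ≤ k)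
    (hodd : t % 2 = 1) :
    pvDist n k t =
      1 + (if t + 1 < k then min (pvDist n k (t - 1)) (pvDist n k (t + 1))
           else pvDist n k (t - 1)) := by
  have hrt1 : ∃ d, Reach n k d (t - 1) := reach_exists n k (t - 1) hn hk (by omega) (by omega)
  have hle1 : pvDist n k t ≤ 1 + pvDist n k (t - 1) := by
    have := pvDist_step n k (t - 1) t hrt1 (by omega) (by omega) (by simp [nbrs])
    omega
  have hpos : 1 ≤ pvDist n k t := pvDist_pos n k t hn hk (by omega) ht (by omega)
  obtain ⟨m1, hm1⟩ : ∃ m1, pvDist n k t = m1 + 1 := ⟨pvDist n k t - 1, by omega⟩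
  obtain ⟨z, hz0, hz1, hznb, _, hzle⟩ := pvDist_decompose n k t m1 hm1
  by_cases hb : t + 1 < k
  · rw [if_pos hb]
    have hrt2 : ∃ d, Reach n k d (t + 1) := reach_exists n k (t + 1) hn hk (by omega) (by omega)
    have hle2 : pvDist n k t ≤ 1 + pvDist n k (t + 1) := by
      have := pvDist_step n k (t + 1) t hrt2 (by omega) hb (by simp [nbrs])
      omega
    have hge : 1 + min (pvDist n k (t - 1)) (pvDist n k (t + 1)) ≤ pvDist n k t := by
      simp only [nbrs, List.mem_cons, List.not_mem_nil, or_false] at hznb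
      rcases hznb with h | h | h
      · have hzt : z = t - 1 := by omega
        subst hzt
        have := min_le_left (pvDist n k (t - 1)) (pvDist n k (t + 1))
        omega
      · have hzt : z = t + 1 := by omega
        subst hzt
        have := min_le_right (pvDist n k (t - 1)) (pvDist n k (t + 1))
        omega
      · omega
    have hle : pvDist n k t ≤ 1 + min (pvDist n k (t - 1)) (pvDist n k (t + 1)) := by
      rcases le_total (pvDist n k (t - 1)) (pvDist n k (t + 1)) with h | h
      · rw [min_eq_left h]; exact hle1
      · rw [min_eq_right h]; exact hle2
    omega
  · rw [if_neg hb]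
    have hge : 1 + pvDist n k (t - 1) ≤ pvDist n k t := by
      simp only [nbrs, List.mem_cons, List.not_mem_nil, or_false] at hznb
      rcases hznb with h | h | h
      · have hzt : z = t - 1 := by omega
        subst hzt
        omega
      · omega
      · omega
    omega

-- ---- B computes pvDist ----
theorem climb_eq_dist (n k : Int) (hn : 0 ≤ n) (hk : n < k) :
    ∀ fuel : Nat, ∀ t : Int, 0 ≤ t → t ≤ k → t.toNat < fuel →
      climb n k fuel t = (pvDist n k t : Int) := by
  intro fuel
  induction fuel with
  | zero => intro t _ _ h; omega
  | succ f ih =>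
    intro t h0 ht hf
    have hmod : PySem.Int.mod t 2 = t % 2 := PySem.Int.mod_eq_emod_of_pos (by norm_num)
    have hdiv : PySem.Int.floordiv t 2 = t / 2 :=
      PySem.Int.floordiv_eq_ediv_of_pos (by norm_num)
    simp only [climb]
    by_cases hbase : t ≤ n
    · rw [if_pos hbase, dist_below n k t hk h0 hbase]
      omega
    · rw [if_neg hbase]
      have hlt : n < t := by omega
      rw [hmod]
      by_cases heven : t % 2 = 0
      · rw [if_pos heven, hdiv]
        have hihh := ih (t / 2) (by omega) (by omega) (by omega)
        rw [hihh, dist_even n k t hn hk hlt ht heven]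
        omega
      · rw [if_neg heven]
        have hodd : t % 2 = 1 := by omega
        have hdiv2 : PySem.Int.floordiv (t + 1) 2 = (t + 1) / 2 :=
          PySem.Int.floordiv_eq_ediv_of_pos (by norm_num)
        have hih1 := ih (t - 1) (by omega) (by omega) (by omega)
        rw [dist_odd n k t hn hk hlt ht hodd]
        by_cases hg : t + 1 < k ∧ 3 ≤ t
        · rw [if_pos hg, hdiv2, hih1]
          have hih2 := ih ((t + 1) / 2) (by omega) (by omega) (by omega)
          rw [hih2, if_pos hg.1,
            dist_even n k (t + 1) hn hk (by omega) (by omega) (by omega)]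
          omega
        · rw [if_neg hg, hih1]
          by_cases hb : t + 1 < k
          · have ht1 : t = 1 := by omega
            have hn0 : n = 0 := by omega
            subst ht1
            subst hn0
            rw [if_pos hb, show (1:Int) - 1 = 0 from rfl,
              dist_below 0 k 0 hk (by omega) (by omega)]
            simp
          · rw [if_neg hb]
            omega

-- ---- A computes pvDist: first the (previously proven) bridge from the deque loop to a
-- level-synchronised loop, then BFS correctness for the level loop ----

def expandB (k : Int) (fr : List Int) (vis : Finset Int) : List Int × Finset Int :=
  match fr with
  | [] => ([], vis)
  | x :: rest =>
    if 0 ≤ x ∧ x < k ∧ x ∉ vis then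
      let p := expandB k rest (insert x vis)
      ((x + 1) :: (x - 1) :: (x * 2) :: p.1, p.2)
    else expandB k rest vis

theorem expandB_mono (k : Int) (fr : List Int) (vis : Finset Int) :
    pvCard k vis ≤ pvCard k (expandB k fr vis).2 := by
  induction fr generalizing vis with
  | nil => simp [expandB]
  | cons x rest ih =>
    by_cases h : 0 ≤ x ∧ x < k ∧ x ∉ vis
    · have := ih (insert x vis)
      have hins := pvCard_insert k x vis h.1 h.2.1 h.2.2
      simp only [expandB, if_pos h]
      omega
    · simpa [expandB, h] using ih vis

theorem expandB_card (k : Int) (fr : List Int) (vis : Finset Int)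
    (h : (expandB k fr vis).1 ≠ []) : pvCard k vis < pvCard k (expandB k fr vis).2 := by
  induction fr generalizing vis with
  | nil => simp [expandB] at h
  | cons x rest ih =>
    by_cases hx : 0 ≤ x ∧ x < k ∧ x ∉ vis
    · have hmono := expandB_mono k rest (insert x vis)
      have hins := pvCard_insert k x vis hx.1 hx.2.1 hx.2.2
      simp only [expandB, if_pos hx]
      omega
    · simp only [expandB, if_neg hx] at h ⊢
      exact ih vis h

def loopB (k : Int) (fr : List Int) (vis : Finset Int) (dist : Int) : Option Int :=
  match fr with
  | [] => none
  | x :: rest =>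
    if k ∈ x :: rest then some dist
    else
      let p := expandB k (x :: rest) vis
      loopB k p.1 p.2 (dist + 1)
termination_by (k.toNat + 1 - pvCard k vis, fr.length)
decreasing_by
  by_cases hp : (expandB k (x :: rest) vis).1 = []
  · apply Prod.Lex.right'
    · have := expandB_mono k (x :: rest) vis
      omega
    · simp [hp]
  · apply Prod.Lex.left
    have h1 := expandB_card k (x :: rest) vis hp
    have h2 := pvCard_le k (expandB k (x :: rest) vis).2
    omega

-- unfold lemmas for the well-founded loops
theorem loopA_nil (k : Int) (vis : Finset Int) : loopA k [] vis = none := by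
  rw [loopA.eq_def]

theorem loopA_cons (k x cnt : Int) (rest : List (Int × Int)) (vis : Finset Int) :
    loopA k ((x, cnt) :: rest) vis =
      if x = k then some cnt
      else if ¬(0 ≤ x ∧ x < k) ∨ x ∈ vis then loopA k rest vis
      else loopA k (rest ++ [(x + 1, cnt + 1), (x - 1, cnt + 1), (x * 2, cnt + 1)])
        (insert x vis) := by
  rw [loopA.eq_def]

theorem loopB_nil (k : Int) (vis : Finset Int) (dist : Int) : loopB k [] vis dist = none := by
  rw [loopB.eq_def]

theorem loopB_cons (k x : Int) (rest : List Int) (vis : Finset Int) (dist : Int) :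
    loopB k (x :: rest) vis dist =
      if k ∈ x :: rest then some dist
      else loopB k (expandB k (x :: rest) vis).1 (expandB k (x :: rest) vis).2 (dist + 1) := by
  rw [loopB.eq_def]

-- one BFS level: A's deque, holding the remaining current level at count d followed by the
-- partially-built next level at count d+1, processes the current level exactly like expandB
theorem bridge_level (k d : Int) (cur : List Int) : ∀ (nxt : List Int) (vis : Finset Int),
    loopA k (cur.map (fun x => (x, d)) ++ nxt.map (fun x => (x, d + 1))) vis =
      if k ∈ cur then some d
      else loopA k ((nxt ++ (expandB k cur vis).1).map (fun x => (x, d + 1)))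
        (expandB k cur vis).2 := by
  induction cur with
  | nil => intro nxt vis; simp [expandB]
  | cons x cs ih =>
    intro nxt vis
    rw [List.map_cons, List.cons_append, loopA_cons]
    by_cases hk : x = k
    · rw [if_pos hk]
      have hmem : k ∈ x :: cs := by rw [← hk]; exact List.mem_cons_self
      rw [if_pos hmem]
    · have hsplit : (k ∈ x :: cs) ↔ (k ∈ cs) := by
        simp only [List.mem_cons]
        exact or_iff_right (fun h => hk h.symm)
      rw [if_neg hk]
      by_cases hskip : ¬(0 ≤ x ∧ x < k) ∨ x ∈ vis
      · have hx : ¬(0 ≤ x ∧ x < k ∧ x ∉ vis) := by tauto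
        have he : expandB k (x :: cs) vis = expandB k cs vis := by
          simp [expandB, hx]
        rw [if_pos hskip, ih nxt vis, he]
        by_cases hkc : k ∈ cs
        · rw [if_pos hkc, if_pos (hsplit.mpr hkc)]
        · rw [if_neg hkc, if_neg (fun h => hkc (hsplit.mp h))]
      · rw [if_neg hskip]
        push Not at hskip
        have hx : 0 ≤ x ∧ x < k ∧ x ∉ vis := ⟨hskip.1.1, hskip.1.2, hskip.2⟩
        have harr : (cs.map (fun x => (x, d)) ++ nxt.map (fun x => (x, d + 1))) ++
            [(x + 1, d + 1), (x - 1, d + 1), (x * 2, d + 1)] =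
            cs.map (fun x => (x, d)) ++
            (nxt ++ [x + 1, x - 1, x * 2]).map (fun x => (x, d + 1)) := by
          simp
        rw [harr, ih (nxt ++ [x + 1, x - 1, x * 2]) (insert x vis)]
        have he : expandB k (x :: cs) vis =
            ((x + 1) :: (x - 1) :: (x * 2) :: (expandB k cs (insert x vis)).1,
              (expandB k cs (insert x vis)).2) := by
          simp [expandB, hx]
        rw [he]
        by_cases hkc : k ∈ cs
        · rw [if_pos hkc, if_pos (hsplit.mpr hkc)]
        · rw [if_neg hkc, if_neg (fun h => hkc (hsplit.mp h))]
          simp [List.append_assoc]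

theorem bridge (k : Int) (fr : List Int) (vis : Finset Int) (d : Int) :
    loopA k (fr.map (fun x => (x, d))) vis = loopB k fr vis d := by
  induction fr, vis, d using loopB.induct k with
  | case1 vis d => rw [List.map_nil, loopA_nil, loopB_nil]
  | case2 vis d x rest hmem =>
    have h := bridge_level k d (x :: rest) [] vis
    simp only [List.map_nil, List.append_nil, List.nil_append] at h
    rw [h, if_pos hmem, loopB_cons, if_pos hmem]
  | case3 vis d x rest hmem p ih =>
    have h := bridge_level k d (x :: rest) [] vis
    simp only [List.map_nil, List.append_nil, List.nil_append] at h
    rw [h, if_neg hmem, loopB_cons, if_neg hmem]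
    exact ih

-- ---- membership facts about expandB ----
theorem expandB_vis_mem (k : Int) (fr : List Int) (vis : Finset Int) (y : Int) :
    y ∈ (expandB k fr vis).2 ↔ y ∈ vis ∨ (y ∈ fr ∧ 0 ≤ y ∧ y < k) := by
  induction fr generalizing vis with
  | nil => simp [expandB]
  | cons x rest ih =>
    by_cases hx : 0 ≤ x ∧ x < k ∧ x ∉ vis
    · simp only [expandB, if_pos hx]
      rw [ih (insert x vis)]
      simp only [Finset.mem_insert, List.mem_cons]
      by_cases hyx : y = x
      · subst hyx
        simp [hx.1, hx.2.1]
      · tauto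
    · simp only [expandB, if_neg hx]
      rw [ih vis]
      simp only [List.mem_cons]
      by_cases hyx : y = x
      · subst hyx
        constructor
        · tauto
        · rintro (h | ⟨_, h0, h1⟩)
          · exact Or.inl h
          · rcases Decidable.em (y ∈ vis) with hv | hv
            · exact Or.inl hv
            · exact absurd ⟨h0, h1, hv⟩ hx
      · tauto

theorem expandB_fr_sound (k : Int) (fr : List Int) (vis : Finset Int) (y : Int)
    (h : y ∈ (expandB k fr vis).1) :
    ∃ x ∈ fr, (0 ≤ x ∧ x < k) ∧ y ∈ nbrs x := by
  induction fr generalizing vis with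
  | nil => simp [expandB] at h
  | cons x rest ih =>
    by_cases hx : 0 ≤ x ∧ x < k ∧ x ∉ vis
    · simp only [expandB, if_pos hx, List.mem_cons] at h
      rcases h with h | h | h | h
      · exact ⟨x, List.mem_cons_self, ⟨hx.1, hx.2.1⟩, by simp [nbrs, h]⟩
      · exact ⟨x, List.mem_cons_self, ⟨hx.1, hx.2.1⟩, by simp [nbrs, h]⟩
      · exact ⟨x, List.mem_cons_self, ⟨hx.1, hx.2.1⟩, by simp [nbrs, h]⟩
      · obtain ⟨z, hz, hzr, hznb⟩ := ih (insert x vis) h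
        exact ⟨z, List.mem_cons_of_mem x hz, hzr, hznb⟩
    · simp only [expandB, if_neg hx] at h
      obtain ⟨z, hz, hzr, hznb⟩ := ih vis h
      exact ⟨z, List.mem_cons_of_mem x hz, hzr, hznb⟩

theorem expandB_fr_complete (k : Int) (fr : List Int) (vis : Finset Int) (x : Int)
    (hx : x ∈ fr) (h0 : 0 ≤ x) (h1 : x < k) (hv : x ∉ vis) :
    ∀ y ∈ nbrs x, y ∈ (expandB k fr vis).1 := by
  induction fr generalizing vis with
  | nil => simp at hx
  | cons z rest ih =>
    intro y hy
    by_cases hz : 0 ≤ z ∧ z < k ∧ z ∉ vis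
    · simp only [expandB, if_pos hz, List.mem_cons]
      by_cases hzx : z = x
      · subst hzx
        simp [nbrs] at hy
        tauto
      · have hxr : x ∈ rest := by
          rcases List.mem_cons.mp hx with h | h
          · exact absurd h.symm hzx
          · exact h
        have hv' : x ∉ insert z vis := by
          simp only [Finset.mem_insert]
          push Not
          exact ⟨fun h => hzx h.symm, hv⟩
        exact Or.inr (Or.inr (Or.inr (ih (insert z vis) hxr hv' y hy)))
    · have hzx : z ≠ x := fun h => hz (h ▸ ⟨h0, h1, hv⟩)
      have hxr : x ∈ rest := by
        rcases List.mem_cons.mp hx with h | h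
        · exact absurd h.symm hzx
        · exact h
      simp only [expandB, if_neg hz]
      exact ih vis hxr hv y hy

-- if every legal stepping stone reached in d steps only leads back into the d-ball,
-- the reachable set has stabilised
theorem reach_stab (n k : Int) (d : Nat)
    (hcl : ∀ x, 0 ≤ x → x < k → Reach n k d x → ∀ y ∈ nbrs x, Reach n k d y) :
    ∀ j, ∀ t, Reach n k (d + j) t → Reach n k d t := by
  intro j
  induction j with
  | zero => intro t h; exact h
  | succ m ih =>
    intro t h
    rcases h with h | ⟨x, hx, h0, h1, hnb⟩
    · exact ih t h
    · exact hcl x h0 h1 (ih x hx) t hnb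

-- BFS correctness of the level loop
theorem loopB_finds (n k : Int) (hn : 0 ≤ n) (hk : n < k)
    (fr : List Int) (vis : Finset Int) (dist : Int) :
    ∀ d : Nat, dist = (d : Int) →
    (∀ x ∈ fr, Reach n k d x) →
    (∀ x, 0 ≤ x → x < k → Reach n k d x → x ∈ fr ∨ x ∈ vis) →
    (Reach n k d k → k ∈ fr) →
    (∀ d' < d, ¬ Reach n k d' k) →
    (∀ x ∈ vis, (0 ≤ x ∧ x < k) ∧ ∀ y ∈ nbrs x, Reach n k d y) →
    loopB k fr vis dist = some (pvDist n k k : Int) := by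
  induction fr, vis, dist using loopB.induct k with
  | case1 vis dist =>
    intro d _ _ H2a H2b _ H5
    exfalso
    have hex : ∃ dd, Reach n k dd k := reach_exists n k k hn hk (by omega) le_rfl
    have hcl : ∀ x, 0 ≤ x → x < k → Reach n k d x → ∀ y ∈ nbrs x, Reach n k d y := by
      intro x h0 h1 hr y hy
      rcases H2a x h0 h1 hr with hf | hv
      · simp at hf
      · exact (H5 x hv).2 y hy
    have hdk : Reach n k (pvDist n k k) k := pvDist_reach n k k hex
    have hreachd : Reach n k d k := by
      rcases le_or_gt (pvDist n k k) d with hle | hgt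
      · exact reach_mono n k _ d hle k hdk
      · have heq : pvDist n k k = d + (pvDist n k k - d) := by omega
        rw [heq] at hdk
        exact reach_stab n k d hcl _ k hdk
    have := H2b hreachd
    simp at this
  | case2 vis dist x rest hmem =>
    intro d hd H1 _ _ H3 _
    rw [loopB_cons, if_pos hmem]
    have hrk : Reach n k d k := H1 k hmem
    have hle : pvDist n k k ≤ d := pvDist_le n k k d hrk
    have hge : d ≤ pvDist n k k := by
      by_contra hcon
      exact H3 _ (by omega) (pvDist_reach n k k ⟨d, hrk⟩)
    have heq : pvDist n k k = d := by omega
    rw [hd, heq]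
  | case3 vis dist x rest hmem p ih =>
    intro d hd H1 H2a H2b H3 H5
    rw [loopB_cons, if_neg hmem]
    have hnotk : ¬ Reach n k d k := fun hr => hmem (H2b hr)
    have hback : ∀ y, 0 ≤ y → y < k → Reach n k (d + 1) y →
        y ∈ (expandB k (x :: rest) vis).1 ∨ y ∈ (expandB k (x :: rest) vis).2 := by
      intro y h0 h1 hry
      have hold : ∀ z, 0 ≤ z → z < k → Reach n k d z →
          z ∈ (expandB k (x :: rest) vis).2 := by
        intro z hz0 hz1 hrz
        apply (expandB_vis_mem k (x :: rest) vis z).mpr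
        rcases H2a z hz0 hz1 hrz with hf | hv
        · exact Or.inr ⟨hf, hz0, hz1⟩
        · exact Or.inl hv
      rcases hry with hry | ⟨z, hrz, hz0, hz1, hnb⟩
      · exact Or.inr (hold y h0 h1 hry)
      · rcases H2a z hz0 hz1 hrz with hf | hv
        · by_cases hzv : z ∈ vis
          · exact Or.inr (hold y h0 h1 ((H5 z hzv).2 y hnb))
          · exact Or.inl (expandB_fr_complete k (x :: rest) vis z hf hz0 hz1 hzv y hnb)
        · exact Or.inr (hold y h0 h1 ((H5 z hv).2 y hnb))
    apply ih (d + 1) (by rw [hd]; push_cast; ring)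
    · intro y hy
      obtain ⟨z, hz, hzr, hznb⟩ := expandB_fr_sound k (x :: rest) vis y hy
      exact Or.inr ⟨z, H1 z hz, hzr.1, hzr.2, hznb⟩
    · exact hback
    · intro hrk1
      rcases hrk1 with hrk1 | ⟨z, hrz, hz0, hz1, hnb⟩
      · exact absurd hrk1 hnotk
      · rcases H2a z hz0 hz1 hrz with hf | hv
        · by_cases hzv : z ∈ vis
          · exact absurd ((H5 z hzv).2 k hnb) hnotk
          · exact expandB_fr_complete k (x :: rest) vis z hf hz0 hz1 hzv k hnb
        · exact absurd ((H5 z hv).2 k hnb) hnotk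
    · intro d' hd'
      by_cases hdd : d' = d
      · subst hdd; exact hnotk
      · exact H3 d' (by omega)
    · intro y hy
      rcases (expandB_vis_mem k (x :: rest) vis y).mp hy with hv | ⟨hf, h0, h1⟩
      · obtain ⟨hrng, hnb⟩ := H5 y hv
        exact ⟨hrng, fun z hz => reach_succ n k d z (hnb z hz)⟩
      · exact ⟨⟨h0, h1⟩, fun z hz => Or.inr ⟨y, H1 y hf, h0, h1, hz⟩⟩

-- ===== VERDICT (by name: the statement is the Claim_ definition above) =====
theorem solution_spec : Claim_equal_solution := by
  intro n k _
  unfold Spec_solution solution solution_alt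
  by_cases hnk : n = k
  · simp [hnk]
  · rw [if_neg hnk, if_neg hnk]
    by_cases hr : 0 ≤ n ∧ n < k
    · rw [if_neg (by simpa using hr)]
      have hb : loopA k [(n, 0)] ∅ = loopB k [n] ∅ 0 := by
        have := bridge k [n] (∅ : Finset Int) 0
        simpa using this
      rw [hb]
      have hfind := loopB_finds n k hr.1 hr.2 [n] ∅ 0 0 rfl
        (by intro x hx; simp at hx; subst hx; rfl)
        (by intro x _ _ hx; simp [Reach] at hx; simp [hx])
        (by intro hx; simp [Reach] at hx; simp [hx])
        (by intro d' hd'; omega)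
        (by intro x hx; simp at hx)
      rw [hfind]
      have hc := climb_eq_dist n k hr.1 hr.2 (k.toNat + 1) k (by omega) le_rfl (by omega)
      rw [hc]
    · rw [if_pos (by simpa using hr)]
      rw [loopA_cons, if_neg hnk, if_pos (Or.inl (by tauto)), loopA_nil]
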